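-- pv_equiv track=rewrite | github.com/MrJanD/AdventOfCode | 2019/AoC2019Day07/AoC2019Day07.py | get_next_phase_sequence
-- ===== SOURCE A (Python) =====
-- def get_next_phase_sequence(current_phase_sequence_int):
--     phase_sequence_list = get_phase_sequence_of(current_phase_sequence_int)
--     part1 = True
--     if current_phase_sequence_int > 50000:
--         part1 = False
--     while not validPhaseSetting(phase_sequence_list, part1):
--         current_phase_sequence_int += 1
--         phase_sequence_list = get_phase_sequence_of(current_phase_sequence_int)
--     return current_phase_sequence_int, get_phase_sequence_of(current_phase_sequence_int)
--
-- def validPhaseSetting(list, part1):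
--     if part1:
--         if 0 in list and 1 in list and 2 in list and 3 in list and 4 in list:
--             return True
--     else:
--         if 5 in list and 6 in list and 7 in list and 8 in list and 9 in list:
--             return True
--     return False
--
-- def get_phase_sequence_of(current_phase_sequence_int):
--     current_phase_sequence_str =  str(current_phase_sequence_int)
--     phase_list = [int(i) for i in str(current_phase_sequence_int)]
--     while len(phase_list) < 5:
--         phase_list.insert(0, 0)
--     return phase_list
-- ===== SOURCE B (Python) =====
-- def _incr(ds):
--     # add one to a big-endian digit list (odometer with carry)
--     if len(ds) == 0:
--         return [1]
--     if ds[-1] == 9: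
--         return _incr(ds[:-1]) + [0]
--     return ds[:-1] + [ds[-1] + 1]
--
--
-- def get_next_phase_sequence(current_phase_sequence_int):
--     required = [0, 1, 2, 3, 4] if current_phase_sequence_int <= 50000 else [5, 6, 7, 8, 9]
--     digits = [int(c) for c in str(current_phase_sequence_int)]
--     digits = [0] * (5 - len(digits)) + digits
--     while not all(d in digits for d in required):
--         digits = _incr(digits)
--     n = 0
--     for d in digits:
--         n = 10 * n + d
--     return n, digits
-- ===== Notes on version B (the rewrite author's own statement) =====
-- stated objective: alternative
-- what changed: A re-converts the integer to a string and re-parses all its digits on every increment step; B converts once and advances the digit list itself with an odometer carry increment, checking the required digits on the list and folding the digits back into the integer once at the end.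
import Mathlib
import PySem

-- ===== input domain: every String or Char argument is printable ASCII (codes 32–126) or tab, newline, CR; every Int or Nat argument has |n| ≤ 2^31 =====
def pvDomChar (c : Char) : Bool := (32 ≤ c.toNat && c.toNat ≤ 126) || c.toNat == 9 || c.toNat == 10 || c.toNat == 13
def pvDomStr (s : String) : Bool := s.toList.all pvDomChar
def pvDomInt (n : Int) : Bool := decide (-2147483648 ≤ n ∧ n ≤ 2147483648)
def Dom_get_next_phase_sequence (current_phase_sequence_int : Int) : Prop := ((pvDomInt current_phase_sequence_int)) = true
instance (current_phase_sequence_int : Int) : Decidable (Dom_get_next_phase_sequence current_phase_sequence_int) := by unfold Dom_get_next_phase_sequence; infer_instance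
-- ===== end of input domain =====

-- B replaces A's per-step int→str→digit-list conversion by a single conversion followed by an
-- in-list odometer increment, rebuilding the integer once at the end by a fold (objective: alternative).

-- int(c) on a one-character string, as both Pythons do in "[int(c) for c in str(n)]";
-- Pre_ keeps n ≥ 0, so the '-' character (ValueError in Python) never occurs.
def pvCharInt (c : Char) : Int := (PySem.Int.ofStr? (String.ofList [c])).getD 0

-- Fuel for both while-loops, a termination device only: (n//100000 + 1)*100000 + 01234 (resp. 56789)
-- is a valid phase integer greater than n, so each Python loop stops within pvFuel steps.
def pvFuel (n : Int) (part1 : Bool) : Nat :=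
  ((PySem.Int.floordiv n 100000 + 1) * 100000 + (if part1 then 1234 else 56789) - n).toNat + 1

-- ===== PORT A =====
-- "while len(phase_list) < 5: phase_list.insert(0, 0)"
def pvPadLoop (l : List Int) : List Int :=
  if l.length < 5 then pvPadLoop (0 :: l) else l
termination_by 5 - l.length

def get_phase_sequence_of (current_phase_sequence_int : Int) : List Int :=
  let phase_list := (PySem.Int.toStr current_phase_sequence_int).toList.map pvCharInt
  pvPadLoop phase_list

def validPhaseSetting (list : List Int) (part1 : Bool) : Bool :=
  if part1 then
    if list.contains 0 && list.contains 1 && list.contains 2 && list.contains 3 && list.contains 4 then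
      true
    else false
  else
    if list.contains 5 && list.contains 6 && list.contains 7 && list.contains 8 && list.contains 9 then
      true
    else false

-- "while not validPhaseSetting(...): current += 1; phase_sequence_list = get_phase_sequence_of(current)"
def pvLoopA : Nat → Bool → Int → Int
  | 0, _, n => n
  | f + 1, part1, n =>
      if validPhaseSetting (get_phase_sequence_of n) part1 then n
      else pvLoopA f part1 (n + 1)

def get_next_phase_sequence (current_phase_sequence_int : Int) : Int × List Int :=
  let part1 : Bool := if current_phase_sequence_int > 50000 then false else true
  let r := pvLoopA (pvFuel current_phase_sequence_int part1) part1 current_phase_sequence_int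
  (r, get_phase_sequence_of r)

-- ===== PORT B =====
-- _incr(ds): ds[:-1] / ds[-1] ported as dropLast / getLastD, exact for the nonempty list of the else branch
def pvIncr (ds : List Int) : List Int :=
  if _h : ds.length = 0 then [1]
  else if ds.getLastD 0 = 9 then pvIncr ds.dropLast ++ [0]
  else ds.dropLast ++ [ds.getLastD 0 + 1]
termination_by ds.length
decreasing_by simp [List.length_dropLast]; omega

-- "while not all(d in digits for d in required): digits = _incr(digits)"
def pvLoopB : Nat → List Int → List Int → List Int
  | 0, _, ds => ds
  | f + 1, required, ds =>
      if required.all (fun d => ds.contains d) then ds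
      else pvLoopB f required (pvIncr ds)

def get_next_phase_sequence_alt (current_phase_sequence_int : Int) : Int × List Int :=
  let required : List Int :=
    if current_phase_sequence_int ≤ 50000 then [0, 1, 2, 3, 4] else [5, 6, 7, 8, 9]
  let digits0 := (PySem.Int.toStr current_phase_sequence_int).toList.map pvCharInt
  let digits1 := List.replicate ((5 - (digits0.length : Int)).toNat) 0 ++ digits0
  let ds := pvLoopB (pvFuel current_phase_sequence_int (decide (current_phase_sequence_int ≤ 50000)))
      required digits1
  (ds.foldl (fun a d => 10 * a + d) 0, ds)

-- ===== PRECONDITION & SPEC =====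
-- Pre_ excludes exactly the negative inputs: there Python A raises ValueError at int('-').
def Pre_get_next_phase_sequence (current_phase_sequence_int : Int) : Prop :=
  0 ≤ current_phase_sequence_int
instance (current_phase_sequence_int : Int) : Decidable (Pre_get_next_phase_sequence current_phase_sequence_int) := by
  unfold Pre_get_next_phase_sequence; infer_instance

def pvWitness_get_next_phase_sequence : Int := 43210

def Spec_get_next_phase_sequence (current_phase_sequence_int : Int) (out : Int × List Int) : Prop :=
  out = get_next_phase_sequence_alt current_phase_sequence_int
instance (current_phase_sequence_int : Int) (out : Int × List Int) : Decidable (Spec_get_next_phase_sequence current_phase_sequence_int out) := by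
  unfold Spec_get_next_phase_sequence; infer_instance

-- ===== CLAIM (what is proved, stated in full; the proofs are below) =====
def Claim_equal_get_next_phase_sequence : Prop :=
  ∀ (current_phase_sequence_int : Int),
    Dom_get_next_phase_sequence current_phase_sequence_int →
    Pre_get_next_phase_sequence current_phase_sequence_int →
    Spec_get_next_phase_sequence current_phase_sequence_int (get_next_phase_sequence current_phase_sequence_int)

-- ===== LEMMAS AND PROOFS =====

-- decimal digits of a natural number, little-endian, as Int entries
def rdigs (n : Nat) : List Int :=
  if n < 10 then [(n : Int)] else ((n % 10 : Nat) : Int) :: rdigs (n / 10)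
termination_by n
decreasing_by omega

-- left-pad with zeros to length 5 (what pvPadLoop computes)
def pvPad (l : List Int) : List Int := List.replicate (5 - l.length) 0 ++ l

-- the digit list A associates with m
def dmodel (m : Nat) : List Int := pvPad (rdigs m).reverse

-- little-endian +1 with carry (pvIncr seen from the right)
def pvInc : List Int → List Int
  | [] => [1]
  | d :: t => if d = 9 then 0 :: pvInc t else (d + 1) :: t

-- big-endian decimal character list of n (what Nat.toDigits 10 computes)
def pvDigitsChar (n : Nat) : List Char :=
  if n < 10 then [Nat.digitChar n] else pvDigitsChar (n / 10) ++ [Nat.digitChar (n % 10)]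
termination_by n
decreasing_by omega

def pvReq (part1 : Bool) : List Int := if part1 then [0, 1, 2, 3, 4] else [5, 6, 7, 8, 9]

theorem rdigs_lt {n : Nat} (h : n < 10) : rdigs n = [(n : Int)] := by
  rw [rdigs]; simp [h]

theorem rdigs_ge {n : Nat} (h : 10 ≤ n) : rdigs n = ((n % 10 : Nat) : Int) :: rdigs (n / 10) := by
  rw [rdigs]; simp [Nat.not_lt.mpr h]

theorem toDigitsCore_eq : ∀ (f n : Nat) (l : List Char), n < f →
    Nat.toDigitsCore 10 f n l = pvDigitsChar n ++ l := by
  intro f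
  induction f with
  | zero => omega
  | succ f ih =>
    intro n l h
    rw [Nat.toDigitsCore]
    by_cases h10 : n / 10 = 0
    · have hn : n < 10 := by omega
      rw [pvDigitsChar]
      simp [h10, hn, Nat.mod_eq_of_lt hn]
    · have hn : 10 ≤ n := by omega
      rw [pvDigitsChar]
      simp only [h10, if_false, Nat.not_lt.mpr hn, if_false]
      rw [ih (n / 10) _ (by omega)]
      simp

theorem toDigits_eq (n : Nat) : Nat.toDigits 10 n = pvDigitsChar n := by
  rw [Nat.toDigits, toDigitsCore_eq _ _ _ (by omega), List.append_nil]

theorem charInt_digitChar (d : Nat) (h : d < 10) : pvCharInt (Nat.digitChar d) = (d : Int) := by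
  interval_cases d <;> decide

theorem map_digitsChar (n : Nat) : (pvDigitsChar n).map pvCharInt = (rdigs n).reverse := by
  induction n using Nat.strong_induction_on with
  | _ n ih =>
    by_cases h : n < 10
    · rw [pvDigitsChar, rdigs]
      simp [h, charInt_digitChar n h]
    · rw [pvDigitsChar, rdigs]
      simp only [h, if_false]
      rw [List.map_append, ih (n / 10) (by omega)]
      simp [charInt_digitChar (n % 10) (by omega)]

theorem map_toChars_eq (m : Nat) :
    (PySem.Int.toStr (m : Int)).toList.map pvCharInt = (rdigs m).reverse := by
  rw [PySem.Int.toList_toStr,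
    show PySem.Int.toChars (m : Int) = Nat.toDigits 10 m from by simp [PySem.Int.toChars],
    toDigits_eq, map_digitsChar]

theorem padLoop_eq (l : List Int) : pvPadLoop l = pvPad l := by
  rw [pvPadLoop]
  by_cases h : l.length < 5
  · rw [padLoop_eq (0 :: l)]
    simp only [h, if_true, pvPad, List.length_cons]
    have h5 : 5 - l.length = (5 - (l.length + 1)) + 1 := by omega
    rw [h5, List.replicate_succ']
    simp
  · have h0 : 5 - l.length = 0 := by omega
    simp [h, pvPad, h0]
termination_by 5 - l.length
decreasing_by simp; omega

theorem phase_of_eq (m : Nat) : get_phase_sequence_of (m : Int) = dmodel m := by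
  unfold get_phase_sequence_of
  simp only [map_toChars_eq, padLoop_eq]
  rfl

theorem incr_reverse (rl : List Int) : pvIncr rl.reverse = (pvInc rl).reverse := by
  cases rl with
  | nil => rw [pvIncr]; simp [pvInc]
  | cons d t =>
    rw [pvIncr, dif_neg (by simp)]
    simp only [List.reverse_cons, List.getLastD_concat, List.dropLast_concat]
    by_cases h : d = 9
    · rw [if_pos h, incr_reverse t, h]
      simp [pvInc]
    · rw [if_neg h]
      simp [pvInc, h]

theorem inc_rdigs (m z : Nat) :
    pvInc (rdigs m ++ List.replicate z 0) =
      rdigs (m + 1) ++ List.replicate ((rdigs m).length + z - (rdigs (m + 1)).length) 0 := by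
  induction m using Nat.strong_induction_on generalizing z with
  | _ m ih =>
    by_cases h10 : m < 10
    · by_cases h9 : m = 9
      · subst h9
        rw [rdigs_lt (show (9:Nat) < 10 by omega), @rdigs_ge 10 (by omega)]
        cases z with
        | zero => simp [pvInc, rdigs_lt]
        | succ z =>
          rw [List.replicate_succ]
          simp [pvInc, rdigs_lt]
          omega
      · rw [rdigs_lt h10, @rdigs_lt (m+1) (by omega)]
        have hne : ((m : Int)) ≠ 9 := by omega
        simp [pvInc, hne]
    · rw [@rdigs_ge m (by omega), @rdigs_ge (m+1) (by omega)]
      by_cases h9 : m % 10 = 9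
      · have e0 : ((m % 10 : Nat) : Int) = 9 := by omega
        have e1 : (m + 1) % 10 = 0 := by omega
        have e2 : (m + 1) / 10 = m / 10 + 1 := by omega
        rw [e1, e2]
        simp only [List.cons_append, pvInc, if_pos e0, ih (m / 10) (by omega) z]
        simp only [List.length_cons, Nat.cast_zero]
        rw [show (rdigs (m / 10)).length + 1 + z - ((rdigs (m / 10 + 1)).length + 1)
              = (rdigs (m / 10)).length + z - (rdigs (m / 10 + 1)).length by omega]
      · have e1 : (m + 1) % 10 = m % 10 + 1 := by omega
        have e2 : (m + 1) / 10 = m / 10 := by omega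
        rw [e1, e2]
        have hne : ((m % 10 : Nat) : Int) ≠ 9 := by omega
        simp only [List.cons_append, pvInc, if_neg hne, List.length_cons]
        rw [show (rdigs (m / 10)).length + 1 + z - ((rdigs (m / 10)).length + 1) = z by omega]
        congr 1

theorem rdigs_len_succ (m : Nat) :
    (rdigs m).length ≤ (rdigs (m + 1)).length ∧ (rdigs (m + 1)).length ≤ (rdigs m).length + 1 := by
  induction m using Nat.strong_induction_on with
  | _ m ih =>
    by_cases h10 : m < 10
    · by_cases h9 : m = 9
      · subst h9; rw [rdigs_lt (show (9:Nat) < 10 by omega), @rdigs_ge 10 (by omega)]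
        simp [rdigs_lt]
      · rw [rdigs_lt h10, @rdigs_lt (m+1) (by omega)]; simp
    · rw [@rdigs_ge m (by omega), @rdigs_ge (m+1) (by omega)]
      by_cases h9 : m % 10 = 9
      · have e2 : (m + 1) / 10 = m / 10 + 1 := by omega
        rw [e2]
        have := ih (m / 10) (by omega)
        simp only [List.length_cons]
        omega
      · have e2 : (m + 1) / 10 = m / 10 := by omega
        rw [e2]; simp

theorem incr_dmodel (m : Nat) : pvIncr (dmodel m) = dmodel (m + 1) := by
  have hrev : dmodel m = (rdigs m ++ List.replicate (5 - (rdigs m).length) 0).reverse := by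
    simp [dmodel, pvPad, List.reverse_append]
  rw [hrev, incr_reverse, inc_rdigs]
  have h := rdigs_len_succ m
  have hcnt : (rdigs m).length + (5 - (rdigs m).length) - (rdigs (m + 1)).length
      = 5 - (rdigs (m + 1)).length := by omega
  rw [hcnt]
  simp [dmodel, pvPad, List.reverse_append]

theorem foldl_rdigs (m : Nat) : ∀ (a : Int),
    List.foldl (fun a d => 10 * a + d) a (rdigs m).reverse
      = a * 10 ^ (rdigs m).length + (m : Int) := by
  induction m using Nat.strong_induction_on with
  | _ m ih =>
    intro a
    by_cases h10 : m < 10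
    · rw [rdigs]
      simp [h10]; ring
    · rw [rdigs]
      simp only [h10, if_false, List.reverse_cons, List.foldl_append, List.foldl_cons,
        List.foldl_nil, List.length_cons]
      rw [ih (m / 10) (by omega) a]
      have : ((m / 10 : Nat) : Int) * 10 + ((m % 10 : Nat) : Int) = (m : Int) := by
        push_cast; omega
      rw [pow_succ]
      nlinarith [this]

theorem foldl_dmodel (m : Nat) :
    (dmodel m).foldl (fun a d => 10 * a + d) 0 = (m : Int) := by
  have hz : ∀ (k : Nat), List.foldl (fun (a : Int) d => 10 * a + d) 0 (List.replicate k 0) = 0 := by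
    intro k; induction k with
    | zero => rfl
    | succ k ihk => simpa [List.replicate_succ] using ihk
  rw [dmodel, pvPad, List.foldl_append, hz, foldl_rdigs]
  simp

theorem valid_eq (l : List Int) (p1 : Bool) :
    validPhaseSetting l p1 = (pvReq p1).all (fun d => l.contains d) := by
  rw [Bool.eq_iff_iff]
  cases p1 <;> simp [validPhaseSetting, pvReq] <;> tauto

theorem loop_lockstep (F : Nat) (p1 : Bool) (m : Nat) :
    ∃ m' : Nat, pvLoopA F p1 (m : Int) = (m' : Int) ∧
      pvLoopB F (pvReq p1) (dmodel m) = dmodel m' := by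
  induction F generalizing m with
  | zero => exact ⟨m, rfl, rfl⟩
  | succ F ih =>
    rw [pvLoopA, pvLoopB, phase_of_eq, valid_eq]
    by_cases h : ((pvReq p1).all fun d => (dmodel m).contains d) = true
    · exact ⟨m, by rw [if_pos h], by rw [if_pos h]⟩
    · obtain ⟨m', h1, h2⟩ := ih (m + 1)
      refine ⟨m', ?_, ?_⟩
      · rw [if_neg h, show (m : Int) + 1 = ((m + 1 : Nat) : Int) by push_cast; ring, h1]
      · rw [if_neg h, incr_dmodel, h2]

-- ===== VERDICT (by name: the statement is the Claim_ definition above) =====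
theorem get_next_phase_sequence_spec : Claim_equal_get_next_phase_sequence := by
  intro n _ hn
  unfold Spec_get_next_phase_sequence
  obtain ⟨m, rfl⟩ : ∃ m : Nat, n = (m : Int) := ⟨n.toNat, (Int.toNat_of_nonneg hn).symm⟩
  unfold get_next_phase_sequence get_next_phase_sequence_alt
  have hpad : List.replicate ((5 - (((rdigs m).reverse.length : Nat) : Int)).toNat) 0 ++ (rdigs m).reverse
      = dmodel m := by
    rw [dmodel, pvPad]
    congr 2
    omega
  by_cases h5 : (50000 : Int) < (m : Int)
  · obtain ⟨m', h1, h2⟩ := loop_lockstep (pvFuel (m : Int) false) false m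
    simp only [map_toChars_eq, hpad, if_pos h5, if_neg (show ¬ (m : Int) ≤ 50000 by omega),
      decide_eq_false (show ¬ (m : Int) ≤ 50000 by omega)]
    rw [show ([5, 6, 7, 8, 9] : List Int) = pvReq false from rfl, h1, h2, phase_of_eq m',
      foldl_dmodel]
  · obtain ⟨m', h1, h2⟩ := loop_lockstep (pvFuel (m : Int) true) true m
    simp only [map_toChars_eq, hpad, if_neg h5, if_pos (show (m : Int) ≤ 50000 by omega),
      decide_eq_true (show (m : Int) ≤ 50000 by omega)]
    rw [show ([0, 1, 2, 3, 4] : List Int) = pvReq true from rfl, h1, h2, phase_of_eq m',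
      foldl_dmodel]
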